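-- pv_equiv track=rewrite | github.com/ADarvishi82/nqueens-heuristics-ai-assignment | ten_heuristic_n_queens.py | h9_diagonal_interference_weighted
-- ===== SOURCE A (Python) =====
-- def h9_diagonal_interference_weighted(board):
--     n = len(board)
--     threats = 0
--     placed_queens_pos = []
--     for col, row in enumerate(board):
--         if row != -1:
--             placed_queens_pos.append((col, row))
--
--     for i in range(len(placed_queens_pos)):
--         for j in range(i + 1, len(placed_queens_pos)):
--             col1, row1 = placed_queens_pos[i]
--             col2, row2 = placed_queens_pos[j]
--             if row1 == row2: # Row conflict
--                 threats += 1
--             if abs(row1 - row2) == abs(col1 - col2): # Diagonal conflict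
--                 threats += 2 # Weight diagonal conflicts more
--     return threats
-- ===== SOURCE B (Python) =====
-- def h9_diagonal_interference_weighted(board):
--     rows = {}
--     d1 = {}
--     d2 = {}
--     for col, row in enumerate(board):
--         if row != -1:
--             rows[row] = rows.get(row, 0) + 1
--             d1[row - col] = d1.get(row - col, 0) + 1
--             d2[row + col] = d2.get(row + col, 0) + 1
--     threats = 0
--     for c in rows.values():
--         threats += c * (c - 1) // 2
--     for c in d1.values():
--         threats += c * (c - 1)
--     for c in d2.values():
--         threats += c * (c - 1)
--     return threats
-- ===== Notes on version B (the rewrite author's own statement) =====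
-- stated objective: faster
-- what changed: Replaced A's O(n^2) scan over all pairs of placed queens by a single pass that counts queens per row, per row-col diagonal and per row+col diagonal in three hash maps, then sums c*(c-1)/2 (weight 2 for diagonals) over each map's counts.
import Mathlib
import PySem

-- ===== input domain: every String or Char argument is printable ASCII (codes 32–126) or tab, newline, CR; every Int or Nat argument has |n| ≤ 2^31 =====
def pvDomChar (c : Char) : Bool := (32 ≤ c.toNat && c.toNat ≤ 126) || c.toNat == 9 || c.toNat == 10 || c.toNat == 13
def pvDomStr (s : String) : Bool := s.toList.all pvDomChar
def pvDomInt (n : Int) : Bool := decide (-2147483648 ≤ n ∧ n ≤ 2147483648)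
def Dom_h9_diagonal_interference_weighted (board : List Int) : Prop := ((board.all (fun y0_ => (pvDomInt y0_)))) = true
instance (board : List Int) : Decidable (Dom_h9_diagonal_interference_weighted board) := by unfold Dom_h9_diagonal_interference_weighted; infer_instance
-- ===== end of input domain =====

-- B replaces A's all-pairs double loop by a single hashing pass that counts queens per row and
-- per diagonal key and sums c*(c-1)/2 (weighted 2 for diagonals) per key.

-- ===== PORT A =====
-- A's 'for i … for j in range(i+1, …)' pair scan, as structural recursion on the suffix
def pvA_outer : List (Int × Int) → Int
  | [] => 0
  | q :: rest =>
      rest.foldl (fun acc p =>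
        let acc := if q.2 = p.2 then acc + 1 else acc
        if (q.2 - p.2).natAbs = (q.1 - p.1).natAbs then acc + 2 else acc) 0
      + pvA_outer rest

def h9_diagonal_interference_weighted (board : List Int) : Int :=
  let placed := (PySem.List.enumerate board 0).foldl
    (fun acc q => if q.2 ≠ -1 then acc ++ [q] else acc) []
  pvA_outer placed

-- ===== PORT B =====
def h9_diagonal_interference_weighted_alt (board : List Int) : Int :=
  let st := (PySem.List.enumerate board 0).foldl
    (fun (st : PySem.Dict Int Int × PySem.Dict Int Int × PySem.Dict Int Int) q =>
      if q.2 ≠ -1 then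
        (st.1.insert q.2 (st.1.getD q.2 0 + 1),
         st.2.1.insert (q.2 - q.1) (st.2.1.getD (q.2 - q.1) 0 + 1),
         st.2.2.insert (q.2 + q.1) (st.2.2.getD (q.2 + q.1) 0 + 1))
      else st)
    (PySem.Dict.empty, PySem.Dict.empty, PySem.Dict.empty)
  let threats := st.1.values.foldl (fun t c => t + PySem.Int.floordiv (c * (c - 1)) 2) 0
  let threats := st.2.1.values.foldl (fun t c => t + c * (c - 1)) threats
  let threats := st.2.2.values.foldl (fun t c => t + c * (c - 1)) threats
  threats

-- ===== PRECONDITION & SPEC =====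
def Spec_h9_diagonal_interference_weighted (board : List Int) (out : Int) : Prop := out = h9_diagonal_interference_weighted_alt board
instance (board : List Int) (out : Int) : Decidable (Spec_h9_diagonal_interference_weighted board out) := by unfold Spec_h9_diagonal_interference_weighted; infer_instance

-- ===== CLAIM (what is proved, stated in full; the proofs are below) =====
def Claim_equal_h9_diagonal_interference_weighted : Prop := ∀ (board : List Int), Dom_h9_diagonal_interference_weighted board → Spec_h9_diagonal_interference_weighted board (h9_diagonal_interference_weighted board)

-- ===== LEMMAS AND PROOFS =====

-- number of unordered pairs of equal values, by recursion on the list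
def pvPairs : List Int → Int
  | [] => 0
  | v :: t => (t.count v : Int) + pvPairs t

lemma pvPairs_append (t : List Int) (y : Int) :
    pvPairs (t ++ [y]) = pvPairs t + (t.count y : Int) := by
  induction t with
  | nil => simp [pvPairs]
  | cons a t ih =>
      simp only [List.cons_append, pvPairs, ih, List.count_append, List.count_cons, List.count_nil]
      by_cases h : a = y
      · subst h; simp; ring
      · have h' : ¬ (y = a) := fun e => h e.symm
        simp [h, h']; ring

lemma pvOfList_append (t : List Int) (y : Int) :
    PySem.Set.ofList (t ++ [y]) =
      if y ∈ t then PySem.Set.ofList t else PySem.Set.ofList t ++ [y] := by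
  rw [PySem.Set.ofList_eq_foldl, List.foldl_append, ← PySem.Set.ofList_eq_foldl]
  simp only [List.foldl_cons, List.foldl_nil, PySem.Set.add]
  by_cases h : y ∈ t
  · simp [PySem.Set.mem_ofList, h]
  · simp [PySem.Set.mem_ofList, h]

-- Σ over the distinct values of C(count, 2) = number of equal pairs
lemma pvSum_choose (ys : List Int) :
    ((PySem.Set.ofList ys).map (fun v => ((ys.count v).choose 2 : Int))).sum = pvPairs ys := by
  induction ys using List.reverseRecOn with
  | nil => simp [pvPairs, PySem.Set.ofList, PySem.Set.empty]
  | append_singleton t y ih =>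
      rw [pvOfList_append, pvPairs_append]
      by_cases h : y ∈ t
      · simp only [if_pos h]
        have hyL : y ∈ PySem.Set.ofList t := (PySem.Set.mem_ofList t y).mpr h
        have hperm := List.perm_cons_erase hyL
        have hnd := PySem.Set.nodup_ofList (xs := t)
        have hne : ∀ v ∈ (PySem.Set.ofList t).erase y, v ≠ y := by
          intro v hv hvy; subst hvy
          exact (hnd.not_mem_erase) hv
        rw [List.Perm.sum_eq (List.Perm.map _ hperm),
            ← ih, List.Perm.sum_eq (List.Perm.map _ hperm)]
        simp only [List.map_cons, List.sum_cons]
        have hcy : (t ++ [y]).count y = t.count y + 1 := by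
          simp [List.count_append]
        have hrest : ((PySem.Set.ofList t).erase y).map
              (fun v => (((t ++ [y]).count v).choose 2 : Int))
            = ((PySem.Set.ofList t).erase y).map
              (fun v => ((t.count v).choose 2 : Int)) := by
          apply List.map_congr_left
          intro v hv
          have : (t ++ [y]).count v = t.count v := by
            simp [List.count_append, Ne.symm (hne v hv)]
          rw [this]
        rw [hcy, hrest]
        have hch : ((t.count y + 1).choose 2 : Int)
            = (t.count y : Int) + ((t.count y).choose 2 : Int) := by
          rw [Nat.choose_succ_succ (t.count y) 1]
          push_cast [Nat.choose_one_right]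
          ring
        rw [hch]; ring
      · simp only [if_neg h]
        have hc0 : t.count y = 0 := List.count_eq_zero.mpr h
        have hrest : (PySem.Set.ofList t).map
              (fun v => (((t ++ [y]).count v).choose 2 : Int))
            = (PySem.Set.ofList t).map
              (fun v => ((t.count v).choose 2 : Int)) := by
          apply List.map_congr_left
          intro v hv
          have hvy : v ≠ y := by
            intro e; subst e; exact h ((PySem.Set.mem_ofList t v).mp hv)
          simp [List.count_append, Ne.symm hvy]
        rw [List.map_append, List.sum_append, hrest, ih]
        simp [List.count_append, hc0]

-- per-pair score of A equals row indicator + 2·(diag-key indicators), for distinct columns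
lemma pvScore_inner (c1 r1 : Int) (t : List (Int × Int)) (h : ∀ q ∈ t, q.1 ≠ c1) (a : Int) :
    t.foldl (fun acc p =>
        let acc := if r1 = p.2 then acc + 1 else acc
        if (r1 - p.2).natAbs = (c1 - p.1).natAbs then acc + 2 else acc) a
    = a + ((t.map (·.2)).count r1 : Int)
        + 2 * ((t.map (fun q => q.2 - q.1)).count (r1 - c1) : Int)
        + 2 * ((t.map (fun q => q.2 + q.1)).count (r1 + c1) : Int) := by
  induction t generalizing a with
  | nil => simp
  | cons p t ih =>
      have hp : p.1 ≠ c1 := h p (by simp)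
      rw [List.foldl_cons, ih (fun q hq => h q (by simp [hq]))]
      simp only [List.map_cons, List.count_cons]
      have key : ((r1 - p.2).natAbs = (c1 - p.1).natAbs)
          ↔ (r1 - c1 = p.2 - p.1 ∨ r1 + c1 = p.2 + p.1) := by omega
      have hnb : ¬(r1 - c1 = p.2 - p.1 ∧ r1 + c1 = p.2 + p.1) := by
        intro ⟨u, v⟩; exact hp (by omega)
      by_cases h1 : r1 = p.2 <;>
        by_cases hd1 : r1 - c1 = p.2 - p.1 <;>
          by_cases hd2 : r1 + c1 = p.2 + p.1 <;>
            simp [h1, hd1, hd2, key] <;> ring_nf <;> omega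

lemma pvA_outer_eq (l : List (Int × Int)) (h : l.Pairwise (fun p q => p.1 ≠ q.1)) :
    pvA_outer l = pvPairs (l.map (·.2))
      + 2 * pvPairs (l.map (fun q => q.2 - q.1))
      + 2 * pvPairs (l.map (fun q => q.2 + q.1)) := by
  induction l with
  | nil => simp [pvA_outer, pvPairs]
  | cons q t ih =>
      obtain ⟨hq, ht⟩ := List.pairwise_cons.mp h
      rw [pvA_outer, pvScore_inner q.1 q.2 t (fun p hp => (hq p hp).symm) 0, ih ht]
      simp only [List.map_cons, pvPairs]
      ring

-- B's triple fold splits into three independent counter folds over the mapped key lists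
lemma pvTripleSplit (m : List (Int × Int)) (r a b : PySem.Dict Int Int) :
    m.foldl (fun (st : PySem.Dict Int Int × PySem.Dict Int Int × PySem.Dict Int Int) q =>
        (st.1.insert q.2 (st.1.getD q.2 0 + 1),
         st.2.1.insert (q.2 - q.1) (st.2.1.getD (q.2 - q.1) 0 + 1),
         st.2.2.insert (q.2 + q.1) (st.2.2.getD (q.2 + q.1) 0 + 1))) (r, a, b)
    = ((m.map (·.2)).foldl (fun d x => d.insert x (d.getD x 0 + 1)) r,
       (m.map (fun q => q.2 - q.1)).foldl (fun d x => d.insert x (d.getD x 0 + 1)) a,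
       (m.map (fun q => q.2 + q.1)).foldl (fun d x => d.insert x (d.getD x 0 + 1)) b) := by
  induction m generalizing r a b with
  | nil => simp
  | cons q m ih => simp [ih]

-- the values list of a counter is the per-distinct-value count list
lemma pvValues_counter (ys : List Int) :
    (PySem.Dict.counter ys).values = (PySem.Set.ofList ys).map (fun v => (ys.count v : Int)) := by
  rw [PySem.Dict.values_eq_map_keys _ (PySem.Dict.nodup_keys_counter ys) 0,
      PySem.Dict.keys_counter]
  exact List.map_congr_left (fun v _ => PySem.Dict.getD_counter ys v)

lemma pvFd (n : Nat) : PySem.Int.floordiv ((n : Int) * ((n : Int) - 1)) 2 = (n.choose 2 : Int) := by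
  cases n with
  | zero => decide
  | succ m =>
      have : ((m + 1 : Nat) : Int) * (((m + 1 : Nat) : Int) - 1) = (((m + 1) * m : Nat) : Int) := by
        push_cast; ring
      rw [this, show (2:Int) = ((2:Nat):Int) from rfl, PySem.Int.floordiv_natCast]
      congr 1
      rw [Nat.choose_two_right]
      simp

lemma pvF2 (n : Nat) : (n : Int) * ((n : Int) - 1) = 2 * (n.choose 2 : Int) := by
  cases n with
  | zero => decide
  | succ m =>
      obtain ⟨k, hk⟩ : ∃ k, (m + 1) * m = k + k := by
        rw [Nat.mul_comm]; exact Nat.even_mul_succ_self m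
      have h2 : (m + 1).choose 2 = k := by
        rw [Nat.choose_two_right]; simp only [Nat.add_sub_cancel]; omega
      rw [h2]
      have h3 : ((m + 1 : Nat) : Int) * (((m + 1 : Nat) : Int) - 1) = (((m + 1) * m : Nat) : Int) := by
        push_cast; ring
      rw [h3]
      omega

-- one counter's summed contribution equals (weight ×) the pair count of its key list
lemma pvSum_fd (ys : List Int) (a : Int) :
    (PySem.Dict.counter ys).values.foldl (fun t c => t + PySem.Int.floordiv (c * (c - 1)) 2) a
      = a + pvPairs ys := by
  rw [pvValues_counter, PySem.List.foldl_add, List.map_map]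
  congr 1
  rw [← pvSum_choose ys]
  exact congrArg List.sum (List.map_congr_left (fun v _ => pvFd (ys.count v)))

lemma pvSum_f2 (ys : List Int) (a : Int) :
    (PySem.Dict.counter ys).values.foldl (fun t c => t + c * (c - 1)) a
      = a + 2 * pvPairs ys := by
  rw [pvValues_counter, PySem.List.foldl_add, List.map_map]
  congr 1
  rw [← pvSum_choose ys, ← List.sum_map_mul_left]
  exact congrArg List.sum (List.map_congr_left (fun v _ => pvF2 (ys.count v)))

-- ===== VERDICT (by name: the statement is the Claim_ definition above) =====
theorem h9_diagonal_interference_weighted_spec : Claim_equal_h9_diagonal_interference_weighted := by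
  intro board _
  unfold Spec_h9_diagonal_interference_weighted
  unfold h9_diagonal_interference_weighted h9_diagonal_interference_weighted_alt
  simp only [PySem.List.foldl_ite_eq_foldl_filter, pvTripleSplit,
    PySem.List.foldl_append_singleton_eq_self, List.nil_append,
    PySem.Dict.foldl_insert_getD_add_one_eq_counter]
  set placed := (PySem.List.enumerate board 0).filter (fun q => decide (q.2 ≠ -1)) with hp
  have hpw : placed.Pairwise (fun p q => p.1 ≠ q.1) := by
    refine List.Pairwise.filter _ ?_
    exact (PySem.List.pairwise_lt_enumerate board 0).imp (fun hlt => ne_of_lt hlt)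
  rw [pvA_outer_eq placed hpw, pvSum_fd, pvSum_f2, pvSum_f2]
  ring
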